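-- pv_equiv track=rewrite | github.com/jlcartas/prevent_alarms | src/utils/get_cdata.py | extract_field_value
-- ===== SOURCE A (Python) =====
-- from typing import Dict, List, Union
--
-- def extract_field_value(content: str, field_names: List[str], all_field_variants: List[List[str]]) -> str:
--     """Helper to extract a field value from CDATA content."""
--     for field_name in field_names:
--         if field_name not in content:
--             continue
--
--         start_idx = content.find(field_name) + len(field_name)
--
--         # Handle separators
--         if content[start_idx:start_idx+3] == ' : ':
--             start_idx += 3
--         elif content[start_idx] == ':':
--             start_idx += 1
--
--         # Find value end
--         end_idx = find_value_end(content, start_idx, all_field_variants)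
--         # Remove newlines and extra spaces
--         value = content[start_idx:end_idx].strip()
--         value = ' '.join(value.split())
--         return value
--
--     return "0"
--
-- def find_value_end(content: str, start_idx: int, all_field_variants: List[List[str]]) -> int:
--     """Find the end position of the current field's value."""
--     end_idx = len(content)
--     for field_variants in all_field_variants:
--         for field in field_variants:
--             pos = content.find(field, start_idx)
--             if -1 < pos < end_idx:
--                 end_idx = pos
--     return end_idx
-- ===== SOURCE B (Python) =====
-- from typing import List
--
-- def extract_field_value(content: str, field_names: List[str], all_field_variants: List[List[str]]) -> str:
--     """Extract a field value from CDATA content (single forward scan for the value end)."""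
--     fields = [f for fv in all_field_variants for f in fv]
--     for field_name in field_names:
--         pos = content.find(field_name)
--         if pos < 0:
--             continue
--         i = pos + len(field_name)
--         if content[i:i + 3] == ' : ':
--             i += 3
--         elif content[i] == ':':
--             i += 1
--         # one left-to-right scan: the value ends at the first position where any field starts
--         end = next((j for j in range(i, len(content))
--                     if any(content.startswith(f, j) for f in fields)),
--                    len(content))
--         return ' '.join(content[i:end].strip().split())
--     return "0"
-- ===== Notes on version B (the rewrite author's own statement) =====
-- stated objective: alternative
-- what changed: find_value_end's per-pattern content.find(...) loop with a running minimum is replaced by one left-to-right scan that stops at the first position where any field variant starts; the variants are flattened once and the first present field name is taken via find() instead of an 'in' test followed by a second find.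
import Mathlib
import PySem

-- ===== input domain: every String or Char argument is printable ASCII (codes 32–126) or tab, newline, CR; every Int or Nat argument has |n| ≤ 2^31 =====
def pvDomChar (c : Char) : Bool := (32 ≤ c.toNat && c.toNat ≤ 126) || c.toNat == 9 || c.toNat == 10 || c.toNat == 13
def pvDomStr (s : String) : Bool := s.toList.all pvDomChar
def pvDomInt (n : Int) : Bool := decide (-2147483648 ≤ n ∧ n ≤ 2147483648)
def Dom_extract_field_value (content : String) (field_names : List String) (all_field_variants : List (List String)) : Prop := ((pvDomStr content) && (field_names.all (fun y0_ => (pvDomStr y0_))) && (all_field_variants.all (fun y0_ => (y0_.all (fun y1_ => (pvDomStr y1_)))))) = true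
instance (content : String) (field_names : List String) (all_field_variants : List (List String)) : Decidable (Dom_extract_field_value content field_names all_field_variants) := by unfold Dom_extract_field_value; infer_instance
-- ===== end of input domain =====

-- B replaces A's per-pattern find+min loop (find_value_end) by a single left-to-right scan
-- for the first position where any field starts (objective: alternative algorithm).
-- Equivalence is about the RETURN value; neither program mutates its arguments.

-- ===== PORT A =====
-- find_value_end(content, start_idx, all_field_variants)
def pvFindValueEnd (cs : List Char) (start : Nat) (all : List (List String)) : Int :=
  all.foldl (fun e fv =>
    fv.foldl (fun e f =>
      let pos := PySem.Chars.findFrom cs f.toList (start : Int) none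
      if -1 < pos ∧ pos < e then pos else e) e) ((cs.length : Int))

-- the tail of the loop body after start_idx is settled
def pvAFinish (cs : List Char) (all : List (List String)) (start : Nat) : String :=
  let endIdx := pvFindValueEnd cs start all
  let value := PySem.Chars.strip (PySem.List.slice cs (some (start : Int)) (some endIdx))
  String.ofList (PySem.Chars.join (" ".toList) (PySem.Chars.split₀ value))

def pvAGo (cs : List Char) (all : List (List String)) : List String → String
  | [] => "0"
  | fn :: rest =>
    if PySem.Chars.isIn fn.toList cs = true then
      let start0 := (PySem.Chars.find cs fn.toList).toNat + fn.toList.length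
      if PySem.List.slice cs (some (start0 : Int)) (some ((start0 : Int) + 3)) = " : ".toList then
        pvAFinish cs all (start0 + 3)
      else
        match PySem.List.pyGet? cs (start0 : Int) with
        | none => ""   -- content[start_idx] raises IndexError here; excluded by Pre_
        | some c => if c = ':' then pvAFinish cs all (start0 + 1) else pvAFinish cs all start0
    else pvAGo cs all rest

def extract_field_value (content : String) (field_names : List String) (all_field_variants : List (List String)) : String :=
  pvAGo content.toList all_field_variants field_names

-- ===== PORT B =====
-- fields = [f for fv in all_field_variants for f in fv]
def pvFields (all : List (List String)) : List String := all.flatMap (fun fv => fv)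

-- end = next((j for j in range(i, len(content)) if any(content.startswith(f, j) for f in fields)), len(content))
-- content.startswith(f, j) with 0 ≤ j ≤ len(content) is exactly: f.toList is a prefix of (cs.drop j)
def pvScanEnd (cs : List Char) (i : Nat) (fields : List String) : Nat :=
  ((List.range' i (cs.length - i)).find?
      (fun j => fields.any (fun f => PySem.Chars.startswith (List.drop j cs) f.toList))).getD cs.length

def pvBFinish (cs : List Char) (i : Nat) (endIdx : Nat) : String :=
  String.ofList (PySem.Chars.join (" ".toList)
    (PySem.Chars.split₀ (PySem.Chars.strip (PySem.List.slice cs (some (i : Int)) (some (endIdx : Int))))))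

def pvBGo (cs : List Char) (fields : List String) : List String → String
  | [] => "0"
  | fn :: rest =>
    let pos := PySem.Chars.find cs fn.toList
    if pos < 0 then pvBGo cs fields rest
    else
      let i := pos.toNat + fn.toList.length
      if PySem.List.slice cs (some (i : Int)) (some ((i : Int) + 3)) = " : ".toList then
        pvBFinish cs (i + 3) (pvScanEnd cs (i + 3) fields)
      else
        match PySem.List.pyGet? cs (i : Int) with
        | none => ""   -- content[i] raises IndexError in Source B too; excluded by Pre_
        | some c =>
          if c = ':' then pvBFinish cs (i + 1) (pvScanEnd cs (i + 1) fields)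
          else pvBFinish cs i (pvScanEnd cs i fields)

def extract_field_value_alt (content : String) (field_names : List String) (all_field_variants : List (List String)) : String :=
  pvBGo content.toList (pvFields all_field_variants) field_names

-- ===== PRECONDITION & SPEC =====
-- Pre_ excludes exactly the inputs on which A raises IndexError: the first field name present in
-- content ends at the very end of content (no ' : ' separator fits), so content[start_idx] is out of range.
def pvPreB (cs : List Char) (field_names : List String) : Bool :=
  match field_names.find? (fun fn => PySem.Chars.isIn fn.toList cs) with
  | none => true
  | some fn =>
    let s := (PySem.Chars.find cs fn.toList).toNat + fn.toList.length
    decide (PySem.List.slice cs (some (s : Int)) (some ((s : Int) + 3)) = " : ".toList) || decide (s < cs.length)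

def Pre_extract_field_value (content : String) (field_names : List String) (all_field_variants : List (List String)) : Prop :=
  pvPreB content.toList field_names = true
instance (content : String) (field_names : List String) (all_field_variants : List (List String)) : Decidable (Pre_extract_field_value content field_names all_field_variants) := by unfold Pre_extract_field_value; infer_instance

def pvWitness_extract_field_value : String × List String × List (List String) :=
  ("Alarm : 12 Zone", ["Alarm"], [["Zone"], ["Alarm"]])

def Spec_extract_field_value (content : String) (field_names : List String) (all_field_variants : List (List String)) (out : String) : Prop := out = extract_field_value_alt content field_names all_field_variants
instance (content : String) (field_names : List String) (all_field_variants : List (List String)) (out : String) : Decidable (Spec_extract_field_value content field_names all_field_variants out) := by unfold Spec_extract_field_value; infer_instance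

-- ===== CLAIM (what is proved, stated in full; the proofs are below) =====
def Claim_equal_extract_field_value : Prop := ∀ (content : String) (field_names : List String) (all_field_variants : List (List String)), Dom_extract_field_value content field_names all_field_variants → Pre_extract_field_value content field_names all_field_variants → Spec_extract_field_value content field_names all_field_variants (extract_field_value content field_names all_field_variants)

-- ===== LEMMAS AND PROOFS =====

-- abbreviation for A's inner update step (definitionally the foldl body of pvFindValueEnd)
def pvStep (cs : List Char) (s : Nat) (e : Int) (f : String) : Int :=
  if -1 < PySem.Chars.findFrom cs f.toList (s : Int) none ∧
      PySem.Chars.findFrom cs f.toList (s : Int) none < e then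
    PySem.Chars.findFrom cs f.toList (s : Int) none
  else e

lemma pvFindValueEnd_eq_flat (cs : List Char) (s : Nat) (all : List (List String)) :
    pvFindValueEnd cs s all = (pvFields all).foldl (pvStep cs s) (cs.length : Int) := by
  unfold pvFindValueEnd pvFields
  rw [List.foldl_flatMap]
  rfl

lemma pvFold_le (cs : List Char) (s : Nat) (fs : List String) (e0 : Int) :
    fs.foldl (pvStep cs s) e0 ≤ e0 := by
  induction fs generalizing e0 with
  | nil => simp
  | cons f fs ih =>
    simp only [List.foldl_cons]
    refine le_trans (ih _) ?_
    unfold pvStep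
    split_ifs with h
    · exact le_of_lt h.2
    · exact le_rfl

lemma pvFold_cases (cs : List Char) (s : Nat) (fs : List String) (e0 : Int) :
    fs.foldl (pvStep cs s) e0 = e0 ∨
      ∃ f ∈ fs, fs.foldl (pvStep cs s) e0 = PySem.Chars.findFrom cs f.toList (s : Int) none ∧
        -1 < fs.foldl (pvStep cs s) e0 := by
  induction fs generalizing e0 with
  | nil => exact Or.inl rfl
  | cons f fs ih =>
    simp only [List.foldl_cons]
    rcases ih (pvStep cs s e0 f) with h | ⟨g, hg, heq, hpos⟩
    · rw [h]
      unfold pvStep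
      split_ifs with hc
      · exact Or.inr ⟨f, List.mem_cons_self, rfl, hc.1⟩
      · exact Or.inl rfl
    · exact Or.inr ⟨g, List.mem_cons_of_mem _ hg, heq, hpos⟩

lemma pvFold_min (cs : List Char) (s : Nat) (fs : List String) (e0 : Int)
    (f : String) (hf : f ∈ fs) (hpos : -1 < PySem.Chars.findFrom cs f.toList (s : Int) none) :
    fs.foldl (pvStep cs s) e0 ≤ PySem.Chars.findFrom cs f.toList (s : Int) none := by
  induction fs generalizing e0 with
  | nil => cases hf
  | cons g fs ih =>
    simp only [List.foldl_cons]
    rcases List.mem_cons.mp hf with rfl | hf'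
    · refine le_trans (pvFold_le cs s fs _) ?_
      unfold pvStep
      split_ifs with h
      · exact le_rfl
      · rcases lt_or_ge (PySem.Chars.findFrom cs f.toList (s : Int) none) e0 with hlt | hge
        · exact absurd ⟨hpos, hlt⟩ h
        · exact hge
    · exact ih _ hf'

-- findFrom's hit stays within the string
lemma pvFindFrom_toNat_le (cs : List Char) (sub : List Char) (s : Nat) (hs : s ≤ cs.length)
    (h : PySem.Chars.findFrom cs sub (s : Int) none ≠ -1) :
    (PySem.Chars.findFrom cs sub (s : Int) none).toNat ≤ cs.length := by
  obtain ⟨hle, hpre, hmin⟩ := PySem.Chars.findFrom_natCast_spec cs sub s hs h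
  by_contra hgt
  rw [Nat.not_le] at hgt
  have hnil : cs.drop (PySem.Chars.findFrom cs sub (s : Int) none).toNat = [] :=
    List.drop_eq_nil_of_le (le_of_lt hgt)
  rw [hnil] at hpre
  have hsub : sub = [] := List.prefix_nil.mp hpre
  exact hmin s le_rfl (lt_of_le_of_lt hs hgt) (by simp [hsub])

-- a prefix occurrence at j ≥ s forces findFrom to hit at or before j
lemma pvFindFrom_of_prefix (cs : List Char) (sub : List Char) (s j : Nat) (hs : s ≤ cs.length)
    (hsj : s ≤ j) (hpre : sub <+: cs.drop j) :
    PySem.Chars.findFrom cs sub (s : Int) none ≠ -1 ∧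
      (PySem.Chars.findFrom cs sub (s : Int) none).toNat ≤ j := by
  have hinf : sub <:+: cs.drop s := by
    have hdd : cs.drop j = (cs.drop s).drop (j - s) := by
      rw [List.drop_drop]
      congr 1
      omega
    rw [hdd] at hpre
    obtain ⟨t, ht⟩ := hpre
    exact ⟨(cs.drop s).take (j - s), t, by rw [List.append_assoc, ht, List.take_append_drop]⟩
  have hne : PySem.Chars.findFrom cs sub (s : Int) none ≠ -1 := by
    intro hcon
    exact (PySem.Chars.findFrom_natCast_eq_neg_one_iff cs sub s hs).mp hcon hinf
  refine ⟨hne, ?_⟩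
  obtain ⟨hle, _, hmin⟩ := PySem.Chars.findFrom_natCast_spec cs sub s hs hne
  by_contra hgt
  rw [Nat.not_le] at hgt
  exact hmin j hsj hgt hpre

-- the scan predicate, unfolded
lemma pvPred_iff (cs : List Char) (fields : List String) (j : Nat) :
    (fields.any (fun f => PySem.Chars.startswith (List.drop j cs) f.toList)) = true ↔
      ∃ f ∈ fields, f.toList <+: cs.drop j := by
  simp [List.any_eq_true, PySem.Chars.startswith_iff]

-- MAIN: A's min-of-finds equals B's forward scan
lemma pvEnd_eq (cs : List Char) (all : List (List String)) (s : Nat) (hs : s ≤ cs.length) :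
    pvFindValueEnd cs s all = (pvScanEnd cs s (pvFields all) : Int) := by
  rw [pvFindValueEnd_eq_flat]
  set fields := pvFields all with hfields
  set r := fields.foldl (pvStep cs s) (cs.length : Int) with hr
  unfold pvScanEnd
  set p : Nat → Bool := fun j => fields.any (fun f => PySem.Chars.startswith (List.drop j cs) f.toList) with hp
  cases hfind : (List.range' s (cs.length - s)).find? p with
  | none =>
    simp only [Option.getD_none]
    have hnone : ∀ t, s ≤ t → t < cs.length → p t = false := by
      intro t h1 h2
      have := List.find?_range'_eq_none.mp hfind t h1 (by omega)
      simpa using this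
    rcases pvFold_cases cs s fields (cs.length : Int) with h | ⟨f, hf, heq, hposr⟩
    · exact h
    · obtain ⟨hle, hpre, _⟩ := PySem.Chars.findFrom_natCast_spec cs f.toList s hs (by omega)
      have hbound := pvFindFrom_toNat_le cs f.toList s hs (by omega)
      rw [← heq] at hle hpre hbound
      by_cases hlt : r.toNat < cs.length
      · have hpt : p r.toNat = true := (pvPred_iff cs fields r.toNat).mpr ⟨f, hf, hpre⟩
        rw [hnone r.toNat (by omega) hlt] at hpt
        cases hpt
      · omega
  | some j =>
    simp only [Option.getD_some]
    obtain ⟨hj3, hjmem, hj4⟩ := List.find?_range'_eq_some.mp hfind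
    obtain ⟨hj1, hj2⟩ := List.mem_range'_1.mp hjmem
    have hjlen : j < cs.length := by omega
    obtain ⟨f, hf, hpre⟩ := (pvPred_iff cs fields j).mp hj3
    obtain ⟨hne, hto⟩ := pvFindFrom_of_prefix cs f.toList s j hs hj1 hpre
    have hpos : -1 < PySem.Chars.findFrom cs f.toList (s : Int) none := by
      obtain ⟨hle, _, _⟩ := PySem.Chars.findFrom_natCast_spec cs f.toList s hs hne
      omega
    have hrle : r ≤ (j : Int) := by
      refine le_trans (pvFold_min cs s fields _ f hf hpos) ?_
      omega
    have hjler : (j : Int) ≤ r := by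
      rcases pvFold_cases cs s fields (cs.length : Int) with h | ⟨g, hg, heq, hgpos⟩
      · rw [hr, h]
        omega
      · obtain ⟨hle, hpreg, _⟩ := PySem.Chars.findFrom_natCast_spec cs g.toList s hs (by omega)
        rw [← heq] at hle hpreg
        by_contra hcon
        rw [Int.not_le] at hcon
        have hrj : r.toNat < j := by omega
        have hpt : p r.toNat = true := (pvPred_iff cs fields r.toNat).mpr ⟨g, hg, hpreg⟩
        have := hj4 r.toNat (by omega) hrj
        rw [hpt] at this
        cases this
    omega

lemma pvFinish_eq (cs : List Char) (all : List (List String)) (s : Nat) (hs : s ≤ cs.length) :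
    pvAFinish cs all s = pvBFinish cs s (pvScanEnd cs s (pvFields all)) := by
  unfold pvAFinish pvBFinish
  rw [pvEnd_eq cs all s hs]

-- branch-condition bridge: '.find(fn) < 0' on B's side is A's 'fn not in content'
lemma pvFind_neg_iff (cs : List Char) (fn : String) :
    PySem.Chars.find cs fn.toList < 0 ↔ PySem.Chars.isIn fn.toList cs = false := by
  rw [PySem.Chars.isIn_eq_false_iff]
  constructor
  · intro h hinf
    have := (PySem.Chars.find_nonneg_iff cs fn.toList).mpr hinf
    omega
  · intro h
    have := (PySem.Chars.find_eq_neg_one_iff cs fn.toList).mpr h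
    omega

-- a ' : ' slice match means the three characters fit inside the string
lemma pvSlice3 (cs : List Char) (i : Nat)
    (h : PySem.List.slice cs (some (i : Int)) (some ((i : Int) + 3)) = " : ".toList) :
    i + 3 ≤ cs.length := by
  have h3 : ((3 : Nat) : Int) = 3 := by norm_num
  have hsl := PySem.List.slice_natCast_add cs i 3
  rw [h3] at hsl
  rw [hsl] at h
  have hlen : ((cs.drop i).take 3).length = (" : ".toList).length := by rw [h]
  simp [List.length_take, List.length_drop] at hlen
  omega

-- ===== VERDICT (by name: the statement is the Claim_ definition above) =====
theorem extract_field_value_spec : Claim_equal_extract_field_value := by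
  intro content field_names all _dom hpre
  unfold Spec_extract_field_value extract_field_value extract_field_value_alt
  unfold Pre_extract_field_value at hpre
  induction field_names with
  | nil => rfl
  | cons fn rest ih =>
    set cs := content.toList with hcs
    by_cases hin : PySem.Chars.isIn fn.toList cs = true
    · unfold pvPreB at hpre
      rw [List.find?_cons_of_pos (by simpa using hin)] at hpre
      simp only [Bool.or_eq_true, decide_eq_true_eq] at hpre
      have hposn : ¬ PySem.Chars.find cs fn.toList < 0 := by
        rw [pvFind_neg_iff]
        simp [hin]
      simp only [pvAGo, pvBGo]
      rw [if_pos hin, if_neg hposn]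
      set start0 := (PySem.Chars.find cs fn.toList).toNat + fn.toList.length with hstart0
      by_cases hsl : PySem.List.slice cs (some (start0 : Int)) (some ((start0 : Int) + 3)) = " : ".toList
      · rw [if_pos hsl, if_pos hsl]
        exact pvFinish_eq cs all (start0 + 3) (pvSlice3 cs start0 hsl)
      · rcases hpre with hpre | hpre
        · exact absurd hpre hsl
        · rw [if_neg hsl, if_neg hsl]
          have hget : PySem.List.pyGet? cs (start0 : Int) = some cs[start0] := by
            rw [PySem.List.pyGet?_natCast]
            exact List.getElem?_eq_getElem hpre
          rw [hget]
          dsimp only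
          by_cases hcol : cs[start0] = ':'
          · rw [if_pos hcol, if_pos hcol]
            exact pvFinish_eq cs all (start0 + 1) (by omega)
          · rw [if_neg hcol, if_neg hcol]
            exact pvFinish_eq cs all start0 (by omega)
    · have hneg : PySem.Chars.find cs fn.toList < 0 := (pvFind_neg_iff cs fn).mpr (by simpa using hin)
      simp only [pvAGo, pvBGo]
      rw [if_neg hin, if_pos hneg]
      refine ih ?_ ?_
      · unfold Dom_extract_field_value at _dom ⊢
        simp only [List.all_cons, Bool.and_eq_true] at _dom ⊢
        tauto
      · unfold pvPreB at hpre ⊢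
        rw [List.find?_cons_of_neg (by simpa using hin)] at hpre
        exact hpre
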